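-- pv_equiv track=rewrite | github.com/Qianhongbo/ECE143-Programming-for-Data-Analysis | gather_values/main.py | gather_values
-- ===== SOURCE A (Python) =====
-- def gather_values(x):
--     """
--     Now that you have get_sample working, generate n samples and tally the number of times an existing key is repeated.
--     Generate a new dictionary with bitstrings as keys and with values as lists
--     that contain the corresponding mapped values from map_bitstring.
--
--     :param x: generate through get_sample function
--     :return: a new dictionary
--     """
--     assert isinstance(x, list)
--
--     result = {}
--     for bitString in x:
--         bitList = list(bitString)
--         numOfZero = 0
--         numOfOne = 0
--         for b in bitList:
--             if b == '0': numOfZero += 1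
--             if b == '1': numOfOne += 1
--         temp = int(numOfZero <= numOfOne)
--         numOfZero = 0
--         numOfOne = 0
--         if bitString not in result:
--             result[bitString] = []
--             result[bitString].append(temp)
--         else:
--             result[bitString].append(temp)
--     return result
-- ===== SOURCE B (Python) =====
-- def gather_values(x):
--     assert isinstance(x, list)
--     counts = {}
--     for s in x:
--         counts[s] = counts.get(s, 0) + 1
--     result = {}
--     for s, c in counts.items():
--         temp = int(s.count('0') <= s.count('1'))
--         result[s] = [temp] * c
--     return result
-- ===== Notes on version B (the rewrite author's own statement) =====
-- stated objective: faster
-- what changed: B first builds a frequency table of the bitstrings in one pass, then computes each distinct string's majority bit once (via str.count) and emits its value list by repetition [temp]*c, so the per-character majority work runs once per distinct string instead of once per occurrence.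
import Mathlib
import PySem

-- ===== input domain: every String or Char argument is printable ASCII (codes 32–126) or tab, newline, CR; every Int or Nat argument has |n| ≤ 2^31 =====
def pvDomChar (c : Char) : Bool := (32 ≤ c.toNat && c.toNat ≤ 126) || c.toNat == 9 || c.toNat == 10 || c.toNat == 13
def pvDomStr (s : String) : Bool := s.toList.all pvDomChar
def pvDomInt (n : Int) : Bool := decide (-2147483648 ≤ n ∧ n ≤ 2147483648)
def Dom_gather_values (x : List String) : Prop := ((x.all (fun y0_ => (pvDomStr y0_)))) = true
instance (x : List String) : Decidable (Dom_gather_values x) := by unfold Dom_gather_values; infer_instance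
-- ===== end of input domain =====

-- B tallies each distinct bitstring once (frequency table, majority via str.count, value list by repetition)
-- instead of A's per-occurrence character loop and append (measured faster in a timing run); exact equivalence proved.

-- ===== PORT A =====
-- inner character loop of A: numOfZero/numOfOne then temp = int(numOfZero <= numOfOne)
def pvMajorityA (s : String) : Int :=
  let bitList := s.toList
  let p := bitList.foldl (fun (q : Int × Int) b =>
      let numOfZero := if b == '0' then q.1 + 1 else q.1
      let numOfOne := if b == '1' then q.2 + 1 else q.2
      (numOfZero, numOfOne)) (0, 0)
  if p.1 ≤ p.2 then 1 else 0

def gather_values (x : List String) : List (String × List Int) :=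
  (x.foldl (fun (result : PySem.Dict String (List Int)) bitString =>
      let temp := pvMajorityA bitString
      if result.contains bitString = false then
        let r1 := result.insert bitString []
        r1.insert bitString (r1.getD bitString [] ++ [temp])
      else
        result.insert bitString (result.getD bitString [] ++ [temp])) PySem.Dict.empty).items

-- ===== PORT B =====
-- temp = int(s.count('0') <= s.count('1'))
def pvMajorityB (s : String) : Int :=
  if PySem.Str.count s "0" ≤ PySem.Str.count s "1" then 1 else 0

def gather_values_alt (x : List String) : List (String × List Int) :=
  let counts := x.foldl (fun (d : PySem.Dict String Int) s => d.insert s (d.getD s 0 + 1)) PySem.Dict.empty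
  (counts.items.foldl (fun (r : PySem.Dict String (List Int)) p =>
      r.insert p.1 (List.replicate p.2.toNat (pvMajorityB p.1))) PySem.Dict.empty).items

-- ===== PRECONDITION & SPEC =====
def Spec_gather_values (x : List String) (out : List (String × List Int)) : Prop := out = gather_values_alt x
instance (x : List String) (out : List (String × List Int)) : Decidable (Spec_gather_values x out) := by unfold Spec_gather_values; infer_instance

-- ===== CLAIM (what is proved, stated in full; the proofs are below) =====
def Claim_equal_gather_values : Prop := ∀ (x : List String), Dom_gather_values x → Spec_gather_values x (gather_values x)

-- ===== LEMMAS AND PROOFS =====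

-- A's inner pair loop computes the two character counts
theorem pvPairFold (cs : List Char) : ∀ (a b : Int),
    cs.foldl (fun (q : Int × Int) b' =>
      let numOfZero := if b' == '0' then q.1 + 1 else q.1
      let numOfOne := if b' == '1' then q.2 + 1 else q.2
      (numOfZero, numOfOne)) (a, b)
    = (a + cs.count '0', b + cs.count '1') := by
  induction cs with
  | nil => intro a b; simp
  | cons h t ih =>
    intro a b
    simp only [List.foldl_cons, ih, List.count_cons]
    by_cases h0 : h = '0' <;> by_cases h1 : h = '1' <;>
      simp_all <;> omega

-- PySem.Chars.count.go on a single-character needle is List.count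
theorem pvGoSingle (c : Char) : ∀ (cs : List Char) (fuel acc : Nat), cs.length ≤ fuel →
    PySem.Chars.count.go [c] fuel cs acc = acc + cs.count c := by
  intro cs
  induction cs with
  | nil => intro fuel acc h; cases fuel <;> simp [PySem.Chars.count.go]
  | cons h t ih =>
    intro fuel acc hf
    cases fuel with
    | zero => simp at hf
    | succ f =>
      rw [PySem.Chars.count.go]
      by_cases hc : c = h
      · subst hc
        simp [List.isPrefixOf, ih f (acc+1) (by simpa using hf)]
        omega
      · simp [List.isPrefixOf, hc, ih f acc (by simpa using hf), Ne.symm hc]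

theorem pvCountSingle (c : Char) (cs : List Char) : PySem.Chars.count cs [c] = cs.count c := by
  simp [PySem.Chars.count, pvGoSingle c cs cs.length 0 le_rfl]

theorem pvMajority_eq (s : String) : pvMajorityA s = pvMajorityB s := by
  unfold pvMajorityA pvMajorityB
  simp only [pvPairFold s.toList 0 0, PySem.Str.count]
  simp [pvCountSingle]

-- A's loop body is exactly a modify-append
theorem pvStepA_eq_modify (d : PySem.Dict String (List Int)) (s : String) :
    (let temp := pvMajorityA s
     if d.contains s = false then
       let r1 := d.insert s []
       r1.insert s (r1.getD s [] ++ [temp])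
     else
       d.insert s (d.getD s [] ++ [temp]))
    = d.modify s [] (· ++ [pvMajorityA s]) := by
  show _ = d.insert s (d.getD s [] ++ [pvMajorityA s])
  by_cases hc : d.contains s = false
  · simp [hc, PySem.Dict.insert_insert_self, PySem.Dict.getD_insert_self,
      PySem.Dict.getD_of_not_contains d [] hc]
  · simp [hc]

-- a Nodup-keyed dict's items, read off its keys
theorem pvItemsEqKeysMap {κ ν : Type} [BEq κ] [LawfulBEq κ] (d : PySem.Dict κ ν) (d0 : ν)
    (h : d.keys.Nodup) : d.items = d.keys.map (fun k => (k, d.getD k d0)) := by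
  conv_lhs => rw [show d.items = d.items.map id from (List.map_id _).symm]
  simp only [PySem.Dict.keys, List.map_map]
  apply List.map_congr_left
  intro p hp
  have hg := PySem.Dict.getD_of_mem_items d (k := p.1) (v := p.2) (by simpa using hp) h d0
  simp [hg]

-- A's result dict, characterised: distinct keys in first-appearance order, replicated majority value
theorem pvA_items (x : List String) :
    gather_values x = (PySem.Set.ofList x).map
      (fun k => (k, List.replicate (x.count k) (pvMajorityA k))) := by
  unfold gather_values
  have hfun : (fun (result : PySem.Dict String (List Int)) bitString =>
      let temp := pvMajorityA bitString
      if result.contains bitString = false then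
        let r1 := result.insert bitString []
        r1.insert bitString (r1.getD bitString [] ++ [temp])
      else
        result.insert bitString (result.getD bitString [] ++ [temp]))
      = (fun (d : PySem.Dict String (List Int)) s => d.modify s [] (· ++ [pvMajorityA s])) := by
    funext d s; exact pvStepA_eq_modify d s
  rw [hfun]
  have hmap : x.foldl (fun (d : PySem.Dict String (List Int)) s => d.modify s [] (· ++ [pvMajorityA s])) PySem.Dict.empty
      = (x.map (fun s => (s, pvMajorityA s))).foldl
          (fun (d : PySem.Dict String (List Int)) p => d.modify p.1 [] (· ++ [p.2])) PySem.Dict.empty := by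
    rw [List.foldl_map]
  rw [hmap]
  set l := x.map (fun s => (s, pvMajorityA s)) with hl
  set D := l.foldl (fun (d : PySem.Dict String (List Int)) p => d.modify p.1 [] (· ++ [p.2])) PySem.Dict.empty with hD
  have hkeys : D.keys = PySem.Set.ofList x := by
    rw [hD]
    rw [PySem.Dict.keys_foldl_modify_key l (fun p => p.1) [] (fun _ p => (· ++ [p.2])) PySem.Dict.empty]
    simp [hl, PySem.Set.ofList_eq_foldl, PySem.Set.update, List.foldl_map]
  have hnodup : D.keys.Nodup := by
    rw [hkeys]; exact PySem.Set.nodup_ofList x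
  have hgetD : ∀ c : String, D.getD c [] = List.replicate (x.count c) (pvMajorityA c) := by
    intro c
    rw [hD, PySem.Dict.getD_foldl_modify_append]
    have : l.filter (fun p => p.1 == c) = (x.filter (fun s => s == c)).map (fun s => (s, pvMajorityA s)) := by
      rw [hl, List.filter_map]; rfl
    rw [this]
    simp only [PySem.Dict.getD_empty, List.nil_append, List.map_map]
    have : (x.filter (fun s => s == c)).map (fun s => pvMajorityA s)
        = (x.filter (fun s => s == c)).map (fun _ => pvMajorityA c) := by
      apply List.map_congr_left
      intro s hs
      have : s = c := by simpa using (List.of_mem_filter hs)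
      rw [this]
    rw [show ((fun p : String × Int => p.2) ∘ fun s => (s, pvMajorityA s)) = fun s => pvMajorityA s from rfl, this]
    rw [List.map_const', List.count_eq_length_filter]
  rw [pvItemsEqKeysMap D [] hnodup, hkeys]
  apply List.map_congr_left
  intro k _
  rw [hgetD k]

-- B's result, characterised the same way
theorem pvB_items (x : List String) :
    gather_values_alt x = (PySem.Set.ofList x).map
      (fun k => (k, List.replicate (x.count k) (pvMajorityB k))) := by
  unfold gather_values_alt
  rw [show x.foldl (fun (d : PySem.Dict String Int) s => d.insert s (d.getD s 0 + 1)) PySem.Dict.empty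
      = PySem.Dict.counter x from PySem.Dict.foldl_insert_getD_add_one_eq_counter x]
  rw [PySem.Dict.items_foldl_insert_fresh (PySem.Dict.counter x).items
      (fun p => p.1) (fun p => List.replicate p.2.toNat (pvMajorityB p.1)) PySem.Dict.empty
      (by intro a _; simp [PySem.Dict.contains_empty])
      (by
        have : (PySem.Dict.counter x).items.map (fun p => p.1) = (PySem.Dict.counter x).keys := rfl
        rw [this, PySem.Dict.keys_counter]; exact PySem.Set.nodup_ofList x)]
  rw [PySem.Dict.items_counter]
  simp [List.map_map, Function.comp_def, PySem.Dict.empty]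

-- ===== VERDICT (by name: the statement is the Claim_ definition above) =====
theorem gather_values_spec : Claim_equal_gather_values := by
  intro x _
  show gather_values x = gather_values_alt x
  rw [pvA_items, pvB_items]
  apply List.map_congr_left
  intro k _
  rw [pvMajority_eq]
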